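-- pv_equiv track=rewrite | github.com/vartulChanana/daily-potd | GFG/2025-07-31.py | powerfulInteger
-- ===== SOURCE A (Python) =====
-- def powerfulInteger(intervals, k):
--     from collections import defaultdict
--
--     diff = defaultdict(int)
--
--     for start, end in intervals:
--         diff[start] += 1
--         diff[end + 1] -= 1
--
--     active = 0
--     prev = None
--     max_powerful = -1
--
--     for point in sorted(diff):
--         if prev is not None and active >= k:
--             max_powerful = max(max_powerful, point - 1)
--         active += diff[point]
--         prev = point
--
--     return max_powerful
-- ===== SOURCE B (Python) =====
-- from bisect import bisect_left, bisect_right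
--
--
-- def powerfulInteger(intervals, k):
--     # Sorted coordinate arrays let us count the intervals covering any point e
--     # directly: bisect_right(starts, e) - bisect_left(ends, e).
--     starts = sorted(s for s, _ in intervals)
--     ends = sorted(e for _, e in intervals)
--     # Candidate answers sit just before a breakpoint (a start, or just past an
--     # end); the smallest breakpoint can never end a covered stretch.
--     candidates = sorted({*starts, *(e + 1 for e in ends)})[1:]
--     best = -1
--     for p in candidates:
--         if bisect_right(starts, p - 1) - bisect_left(ends, p - 1) >= k:
--             best = max(best, p - 1)
--     return best
-- ===== Notes on version B (the rewrite author's own statement) =====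
-- stated objective: alternative
-- what changed: Replaces A's difference-map plus running-sum sweep (defaultdict of +1/-1 deltas, accumulated over the sorted breakpoints with prev/active state) by sorted start/end coordinate arrays in which the number of intervals covering each candidate point is obtained directly as bisect_right(starts, e) - bisect_left(ends, e), folded with a best-so-far maximum.
import Mathlib
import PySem

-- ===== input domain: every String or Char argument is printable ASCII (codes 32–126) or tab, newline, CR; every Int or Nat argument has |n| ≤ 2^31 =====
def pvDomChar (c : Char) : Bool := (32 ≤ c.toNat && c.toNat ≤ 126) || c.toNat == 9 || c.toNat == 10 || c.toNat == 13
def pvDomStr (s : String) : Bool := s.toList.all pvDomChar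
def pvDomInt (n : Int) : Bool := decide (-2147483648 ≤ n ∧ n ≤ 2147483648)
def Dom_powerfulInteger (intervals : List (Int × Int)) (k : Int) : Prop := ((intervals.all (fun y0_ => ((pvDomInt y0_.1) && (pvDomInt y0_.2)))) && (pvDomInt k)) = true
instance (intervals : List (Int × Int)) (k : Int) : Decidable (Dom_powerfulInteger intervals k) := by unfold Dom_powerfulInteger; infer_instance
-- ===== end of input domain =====

-- B replaces A's difference-map + running-sum sweep by sorted coordinate arrays with a
-- per-candidate binary-search coverage count (objective: alternative algorithm, same cost class).

-- ===== PORT A =====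
-- diff = defaultdict(int); for start, end in intervals: diff[start] += 1; diff[end+1] -= 1
def pvDiffDict (intervals : List (Int × Int)) : PySem.Dict Int Int :=
  intervals.foldl (fun d se =>
    let d1 := d.insert se.1 (d.getD se.1 0 + 1)
    d1.insert (se.2 + 1) (d1.getD (se.2 + 1) 0 - 1)) PySem.Dict.empty

-- the sweep loop: for point in sorted(diff): …  (state: active, prev, max_powerful)
def pvSweepA (diff : PySem.Dict Int Int) (k : Int) : List Int → Int → Option Int → Int → Int
  | [], _, _, maxp => maxp
  | point :: rest, active, prev, maxp =>
    pvSweepA diff k rest (active + diff.getD point 0) (some point)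
      (if prev.isSome ∧ k ≤ active then max maxp (point - 1) else maxp)

def powerfulInteger (intervals : List (Int × Int)) (k : Int) : Int :=
  let diff := pvDiffDict intervals
  pvSweepA diff k (PySem.List.sorted diff.keys (fun x => x)) 0 none (-1)

-- ===== PORT B =====
def pvStarts (intervals : List (Int × Int)) : List Int :=
  PySem.List.sorted (intervals.map (fun se => se.1)) (fun x => x)

def pvEnds (intervals : List (Int × Int)) : List Int :=
  PySem.List.sorted (intervals.map (fun se => se.2)) (fun x => x)

-- candidates = sorted({*starts, *(e + 1 for e in ends)})[1:]
def pvCands (intervals : List (Int × Int)) : List Int :=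
  (PySem.List.sorted
    (PySem.Set.ofList (pvStarts intervals ++ (pvEnds intervals).map (fun e => e + 1)))
    (fun x => x)).drop 1

-- bisect_right(starts, e) - bisect_left(ends, e): intervals covering e (as A counts them)
def pvCover (starts ends : List Int) (e : Int) : Int :=
  (PySem.List.bisectRight starts e : Int) - (PySem.List.bisectLeft ends e : Int)

def powerfulInteger_alt (intervals : List (Int × Int)) (k : Int) : Int :=
  let starts := pvStarts intervals
  let ends := pvEnds intervals
  (pvCands intervals).foldl
    (fun best p => if k ≤ pvCover starts ends (p - 1) then max best (p - 1) else best) (-1)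

-- ===== PRECONDITION & SPEC =====
def Spec_powerfulInteger (intervals : List (Int × Int)) (k : Int) (out : Int) : Prop := out = powerfulInteger_alt intervals k
instance (intervals : List (Int × Int)) (k : Int) (out : Int) : Decidable (Spec_powerfulInteger intervals k out) := by unfold Spec_powerfulInteger; infer_instance

-- ===== CLAIM (what is proved, stated in full; the proofs are below) =====
def Claim_equal_powerfulInteger : Prop := ∀ (intervals : List (Int × Int)) (k : Int), Dom_powerfulInteger intervals k → Spec_powerfulInteger intervals k (powerfulInteger intervals k)

-- ===== LEMMAS AND PROOFS =====

-- per-key value of A's difference map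
def pvDiffVal (intervals : List (Int × Int)) (q : Int) : Int :=
  ((intervals.map (fun se => se.1)).count q : Int) - ((intervals.map (fun se => se.2 + 1)).count q : Int)

theorem pv_getD_fold (l : List (Int × Int)) (d : PySem.Dict Int Int) (q : Int) :
    (l.foldl (fun d se =>
        let d1 := d.insert se.1 (d.getD se.1 0 + 1)
        d1.insert (se.2 + 1) (d1.getD (se.2 + 1) 0 - 1)) d).getD q 0
      = d.getD q 0 + pvDiffVal l q := by
  induction l generalizing d with
  | nil => simp [pvDiffVal]
  | cons se l ih =>
    simp only [List.foldl_cons, ih]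
    simp only [pvDiffVal, List.map_cons, List.count_cons, PySem.Dict.getD_insert]
    by_cases h1 : q = se.1 <;> by_cases h2 : q = se.2 + 1 <;>
      simp [h1, h2] <;> omega

theorem pv_mem_keys_fold (l : List (Int × Int)) (d : PySem.Dict Int Int) (q : Int) :
    q ∈ (l.foldl (fun d se =>
        let d1 := d.insert se.1 (d.getD se.1 0 + 1)
        d1.insert (se.2 + 1) (d1.getD (se.2 + 1) 0 - 1)) d).keys
      ↔ q ∈ d.keys ∨ q ∈ l.map (fun se => se.1) ∨ q ∈ l.map (fun se => se.2 + 1) := by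
  induction l generalizing d with
  | nil => simp
  | cons se l ih =>
    simp only [List.foldl_cons, ih, PySem.Dict.mem_keys_insert, List.map_cons, List.mem_cons]
    tauto

theorem pv_nodup_keys_fold (l : List (Int × Int)) (d : PySem.Dict Int Int)
    (h : d.keys.Nodup) :
    (l.foldl (fun d se =>
        let d1 := d.insert se.1 (d.getD se.1 0 + 1)
        d1.insert (se.2 + 1) (d1.getD (se.2 + 1) 0 - 1)) d).keys.Nodup := by
  induction l generalizing d with
  | nil => exact h
  | cons se l ih =>
    exact ih _ (PySem.Dict.nodup_keys_insert _ _ _ (PySem.Dict.nodup_keys_insert _ _ _ h))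

theorem pv_sum_ite_mem (pre : List Int) (a : Int) (h : pre.Nodup) :
    (pre.map (fun q => if a = q then (1 : Int) else 0)).sum = if a ∈ pre then 1 else 0 := by
  induction pre with
  | nil => simp
  | cons b pre ih =>
    simp only [List.map_cons, List.sum_cons, List.mem_cons, List.nodup_cons] at *
    rcases h with ⟨hb, hn⟩
    by_cases hab : a = b
    · subst hab
      simp [ih hn, hb]
    · simp [hab, ih hn]

theorem pv_countP_eq_sum (L pre : List Int) (x : Int) (hnd : pre.Nodup)
    (hlt : ∀ q ∈ pre, q < x) (hcov : ∀ s ∈ L, s < x → s ∈ pre) :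
    ((L.countP (fun s => decide (s < x)) : Nat) : Int) = (pre.map (fun q => (L.count q : Int))).sum := by
  induction L with
  | nil => simp
  | cons a L ih =>
    have hcov' : ∀ s ∈ L, s < x → s ∈ pre := fun s hs => hcov s (List.mem_cons_of_mem _ hs)
    simp only [List.countP_cons, List.count_cons]
    have hsplit : (pre.map (fun q => ((L.count q + if a == q then 1 else 0 : Nat) : Int))).sum
        = (pre.map (fun q => (L.count q : Int))).sum + (pre.map (fun q => if a = q then (1:Int) else 0)).sum := by
      rw [← List.sum_map_add]
      congr 1
      apply List.map_congr_left
      intro q _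
      by_cases h : q = a
      · subst h; simp
      · have hne : (a == q) = false := beq_eq_false_iff_ne.mpr (Ne.symm h)
        simp [hne]
        exact fun hh => h hh.symm
    rw [hsplit, pv_sum_ite_mem pre a hnd, ← ih hcov']
    have hmem : (a ∈ pre) ↔ (a < x) := ⟨fun h => hlt a h, fun h => hcov a (by simp) h⟩
    by_cases hax : a < x
    · simp [hax, hmem.mpr hax]
    · have : a ∉ pre := fun h => hax (hmem.mp h)
      simp [hax, this]

theorem pv_countP_eq_of_index (xs : List Int) (p : Int → Bool) (i : Nat)
    (hle : i ≤ xs.length)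
    (h1 : ∀ (j : Nat) (hj : j < xs.length), j < i → p xs[j])
    (h2 : ∀ (j : Nat) (hj : j < xs.length), i ≤ j → ¬ p xs[j]) :
    xs.countP p = i := by
  induction xs generalizing i with
  | nil => simp at hle ⊢; omega
  | cons a xs ih =>
    cases i with
    | zero =>
      simp only [List.countP_cons]
      have ha : ¬ p a := by simpa using h2 0 (by simp) (by omega)
      have : xs.countP p = 0 := by
        apply ih 0 (by omega)
        · omega
        · intro j hj _; simpa using h2 (j+1) (by simpa using Nat.succ_lt_succ hj) (by omega)
      simp [this, ha]
    | succ i =>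
      have ha : p a := by simpa using h1 0 (by simp) (by omega)
      have : xs.countP p = i := by
        apply ih i (by simpa using hle)
        · intro j hj hji; simpa using h1 (j+1) (by simpa using Nat.succ_lt_succ hj) (by omega)
        · intro j hj hji; simpa using h2 (j+1) (by simpa using Nat.succ_lt_succ hj) (by omega)
      simp [this, ha]

theorem pv_bisectRight_eq_countP (xs : List Int) (x : Int)
    (h : xs.Pairwise (· ≤ ·)) :
    PySem.List.bisectRight xs x = xs.countP (fun s => decide (s ≤ x)) := by
  obtain ⟨hle, h1, h2⟩ := PySem.List.bisectRight_spec xs x h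
  exact (pv_countP_eq_of_index xs _ _ hle
    (fun j hj hji => by simpa using h1 j hj hji)
    (fun j hj hji => by simpa using (h2 j hj hji))).symm

theorem pv_bisectLeft_eq_countP (xs : List Int) (x : Int)
    (h : xs.Pairwise (· ≤ ·)) :
    PySem.List.bisectLeft xs x = xs.countP (fun s => decide (s < x)) := by
  obtain ⟨hle, h1, h2⟩ := PySem.List.bisectLeft_spec xs x h
  exact (pv_countP_eq_of_index xs _ _ hle
    (fun j hj hji => by simpa using h1 j hj hji)
    (fun j hj hji => by simpa using (h2 j hj hji))).symm

theorem pv_pts_eq (intervals : List (Int × Int)) :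
    PySem.List.sorted (pvDiffDict intervals).keys (fun x => x)
      = PySem.List.sorted
          (PySem.Set.ofList (pvStarts intervals ++ (pvEnds intervals).map (fun e => e + 1)))
          (fun x => x) := by
  apply PySem.List.sorted_eq_sorted_of_perm _ _ _ (fun a b h => h)
  unfold pvDiffDict
  rw [List.perm_ext_iff_of_nodup
    (pv_nodup_keys_fold _ _ PySem.Dict.nodup_keys_empty)
    (PySem.Set.nodup_ofList _)]
  intro q
  rw [pv_mem_keys_fold, PySem.Set.mem_ofList]
  simp only [PySem.Dict.keys_empty, List.mem_append, List.mem_map,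
    pvStarts, pvEnds, PySem.List.mem_sorted, List.not_mem_nil, false_or]
  constructor
  · rintro (⟨se, hse, rfl⟩ | ⟨se, hse, rfl⟩)
    · exact Or.inl ⟨se, hse, rfl⟩
    · exact Or.inr ⟨se.2, ⟨se, hse, rfl⟩, rfl⟩
  · rintro (⟨se, hse, rfl⟩ | ⟨e, ⟨se, hse, rfl⟩, rfl⟩)
    · exact Or.inl ⟨se, hse, rfl⟩
    · exact Or.inr ⟨se, hse, rfl⟩

theorem pv_cover_eq (intervals : List (Int × Int)) (p : Int) :
    pvCover (pvStarts intervals) (pvEnds intervals) (p - 1)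
      = ((intervals.map (fun se => se.1)).countP (fun s => decide (s < p)) : Int)
        - ((intervals.map (fun se => se.2 + 1)).countP (fun t => decide (t < p)) : Int) := by
  unfold pvCover
  rw [pv_bisectRight_eq_countP _ _ (by simpa using PySem.List.sorted_pairwise (intervals.map (fun se => se.1)) (fun x => x)),
      pv_bisectLeft_eq_countP _ _ (by simpa using PySem.List.sorted_pairwise (intervals.map (fun se => se.2)) (fun x => x))]
  have h1 : (pvStarts intervals).countP (fun s => decide (s ≤ p - 1))
      = (intervals.map (fun se => se.1)).countP (fun s => decide (s < p)) := by
    unfold pvStarts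
    rw [(PySem.List.sorted_perm (intervals.map (fun se => se.1)) (fun x => x) false).countP_eq]
    exact List.countP_congr (fun x _ => by simp only [decide_eq_true_eq]; omega)
  have h2 : (pvEnds intervals).countP (fun s => decide (s < p - 1))
      = (intervals.map (fun se => se.2 + 1)).countP (fun t => decide (t < p)) := by
    unfold pvEnds
    rw [(PySem.List.sorted_perm (intervals.map (fun se => se.2)) (fun x => x) false).countP_eq,
        List.countP_map, List.countP_map]
    exact List.countP_congr (fun x _ => by simp only [Function.comp_apply, decide_eq_true_eq]; omega)
  rw [h1, h2]

theorem pv_getD_diffDict (intervals : List (Int × Int)) (q : Int) :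
    (pvDiffDict intervals).getD q 0 = pvDiffVal intervals q := by
  unfold pvDiffDict
  rw [pv_getD_fold]
  simp [PySem.Dict.getD_empty]

theorem pv_sum_diffVal (intervals : List (Int × Int)) (pre : List Int) :
    (pre.map (pvDiffVal intervals)).sum
      = (pre.map (fun q => ((intervals.map (fun se => se.1)).count q : Int))).sum
        - (pre.map (fun q => ((intervals.map (fun se => se.2 + 1)).count q : Int))).sum := by
  induction pre with
  | nil => simp
  | cons a pre ih => simp only [List.map_cons, List.sum_cons, ih, pvDiffVal]; ring

theorem pv_sweep (intervals : List (Int × Int)) (k : Int) :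
    ∀ (xs pre : List Int) (v m : Int),
      (pre ++ xs).Pairwise (· < ·) →
      (∀ s ∈ intervals.map (fun se => se.1), s ∈ pre ++ xs) →
      (∀ t ∈ intervals.map (fun se => se.2 + 1), t ∈ pre ++ xs) →
      pvSweepA (pvDiffDict intervals) k xs ((pre.map (pvDiffVal intervals)).sum) (some v) m
        = xs.foldl (fun best p =>
            if k ≤ pvCover (pvStarts intervals) (pvEnds intervals) (p - 1)
            then max best (p - 1) else best) m := by
  intro xs
  induction xs with
  | nil => intro pre v m _ _ _; rfl
  | cons x xs ih =>
    intro pre v m hpw hS hE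
    have hndpre : pre.Nodup :=
      ((List.pairwise_append.mp hpw).1.imp (fun {a b} h => ne_of_lt h))
    have hlt : ∀ q ∈ pre, q < x :=
      fun q hq => (List.pairwise_append.mp hpw).2.2 q hq x (by simp)
    have hx_lt : ∀ b ∈ xs, x < b := by
      have := (List.pairwise_append.mp hpw).2.1
      exact (List.pairwise_cons.mp this).1
    -- active = cover at x
    have hsum : (pre.map (pvDiffVal intervals)).sum
        = pvCover (pvStarts intervals) (pvEnds intervals) (x - 1) := by
      rw [pv_cover_eq, pv_sum_diffVal]
      rw [← pv_countP_eq_sum (intervals.map (fun se => se.1)) pre x hndpre hlt ?hc1,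
          ← pv_countP_eq_sum (intervals.map (fun se => se.2 + 1)) pre x hndpre hlt ?hc2]
      case hc1 =>
        intro s hs hsx
        rcases List.mem_append.mp (hS s hs) with h | h
        · exact h
        · rcases List.mem_cons.mp h with rfl | h
          · omega
          · exact absurd (hx_lt s h) (by omega)
      case hc2 =>
        intro s hs hsx
        rcases List.mem_append.mp (hE s hs) with h | h
        · exact h
        · rcases List.mem_cons.mp h with rfl | h
          · omega
          · exact absurd (hx_lt s h) (by omega)
    show pvSweepA (pvDiffDict intervals) k xs
        ((pre.map (pvDiffVal intervals)).sum + (pvDiffDict intervals).getD x 0) (some x)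
        (if (some v).isSome ∧ k ≤ (pre.map (pvDiffVal intervals)).sum
         then max m (x - 1) else m) = _
    rw [pv_getD_diffDict]
    have hnext : (pre.map (pvDiffVal intervals)).sum + pvDiffVal intervals x
        = ((pre ++ [x]).map (pvDiffVal intervals)).sum := by
      simp
    rw [hnext]
    have happ : (pre ++ [x]) ++ xs = pre ++ x :: xs := by simp
    have ih' := ih (pre ++ [x]) x
      (if (some v).isSome ∧ k ≤ (pre.map (pvDiffVal intervals)).sum then max m (x - 1) else m)
      (by rw [happ]; exact hpw) (by rw [happ]; exact hS) (by rw [happ]; exact hE)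
    rw [ih']
    simp only [List.foldl_cons, Option.isSome_some, true_and, hsum]

-- every start / shifted end occurs in the sorted candidate pool
theorem pv_mem_full (intervals : List (Int × Int)) (q : Int)
    (h : q ∈ intervals.map (fun se => se.1) ∨ q ∈ intervals.map (fun se => se.2 + 1)) :
    q ∈ PySem.List.sorted
        (PySem.Set.ofList (pvStarts intervals ++ (pvEnds intervals).map (fun e => e + 1)))
        (fun x => x) := by
  rw [PySem.List.mem_sorted, PySem.Set.mem_ofList, List.mem_append]
  rcases h with h | h
  · exact Or.inl (by rw [pvStarts, PySem.List.mem_sorted]; exact h)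
  · right
    rcases List.mem_map.mp h with ⟨se, hse, rfl⟩
    exact List.mem_map.mpr ⟨se.2, by rw [pvEnds, PySem.List.mem_sorted]; exact List.mem_map.mpr ⟨se, hse, rfl⟩, rfl⟩

-- ===== VERDICT (by name: the statement is the Claim_ definition above) =====
theorem powerfulInteger_spec : Claim_equal_powerfulInteger := by
  intro intervals k _
  unfold Spec_powerfulInteger powerfulInteger powerfulInteger_alt
  simp only []
  rw [pv_pts_eq]
  cases hfull : PySem.List.sorted
      (PySem.Set.ofList (pvStarts intervals ++ (pvEnds intervals).map (fun e => e + 1)))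
      (fun x => x) with
  | nil => simp [pvCands, hfull, pvSweepA]
  | cons p0 rest =>
    have hpw : (p0 :: rest).Pairwise (· < ·) := by
      rw [← hfull]; exact PySem.List.sorted_ofList_pairwise_lt _
    have hS : ∀ s ∈ intervals.map (fun se => se.1), s ∈ [p0] ++ rest := by
      intro s hs
      have := pv_mem_full intervals s (Or.inl hs)
      rw [hfull] at this; simpa using this
    have hE : ∀ t ∈ intervals.map (fun se => se.2 + 1), t ∈ [p0] ++ rest := by
      intro t ht
      have := pv_mem_full intervals t (Or.inr ht)
      rw [hfull] at this; simpa using this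
    show pvSweepA (pvDiffDict intervals) k rest
        (0 + (pvDiffDict intervals).getD p0 0) (some p0)
        (if (none : Option Int).isSome ∧ k ≤ 0 then max (-1) (p0 - 1) else (-1))
        = (pvCands intervals).foldl _ (-1)
    have hcands : pvCands intervals = rest := by
      rw [pvCands, hfull]; rfl
    have h0 : 0 + (pvDiffDict intervals).getD p0 0
        = (([p0]).map (pvDiffVal intervals)).sum := by
      rw [pv_getD_diffDict]; simp
    rw [h0, hcands]
    simp only [Option.isSome_none]
    exact pv_sweep intervals k rest [p0] p0 (-1) (by simpa using hpw) hS hE
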